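-- pv_equiv track=rewrite | github.com/lsegtim/Recommand_chat_route_api | test/shortest_path/3.py | duplicate_nodes
-- ===== SOURCE A (Python) =====
-- def duplicate_nodes(adj_matrix, copies):
--     n = len(adj_matrix)
--     new_n = n * copies
--     new_matrix = [[0] * new_n for _ in range(new_n)]
--
--     for i in range(new_n):
--         for j in range(new_n):
--             new_matrix[i][j] = adj_matrix[i % n][j % n]
--
--     return new_matrix
-- ===== SOURCE B (Python) =====
-- def duplicate_nodes(adj_matrix, copies):
--     n = len(adj_matrix)
--     base = [row[:n] * copies for row in adj_matrix]
--     return [r.copy() for _ in range(copies) for r in base]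
-- ===== Notes on version B (the rewrite author's own statement) =====
-- stated objective: alternative
-- what changed: Instead of filling a pre-allocated (n*copies)^2 zero matrix entry by entry with nested index loops, B builds each of the n expanded rows once via slicing and list repetition (row[:n]*copies) and then emits the whole block of rows copies times, copying each row.
import Mathlib
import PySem

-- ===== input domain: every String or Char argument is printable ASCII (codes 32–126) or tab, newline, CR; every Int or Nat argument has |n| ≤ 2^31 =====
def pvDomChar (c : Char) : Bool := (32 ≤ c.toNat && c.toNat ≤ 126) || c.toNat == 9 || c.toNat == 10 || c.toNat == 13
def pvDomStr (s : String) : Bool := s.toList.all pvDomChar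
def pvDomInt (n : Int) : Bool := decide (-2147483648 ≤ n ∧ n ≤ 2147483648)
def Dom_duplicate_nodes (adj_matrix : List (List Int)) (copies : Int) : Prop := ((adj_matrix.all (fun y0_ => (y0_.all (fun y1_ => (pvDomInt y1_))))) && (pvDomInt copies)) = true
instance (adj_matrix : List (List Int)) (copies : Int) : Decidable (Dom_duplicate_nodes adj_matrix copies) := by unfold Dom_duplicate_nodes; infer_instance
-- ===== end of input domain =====

-- B replaces A's entry-by-entry fill of a pre-allocated zero matrix by building each expanded
-- row once (slice + list repetition) and emitting the block of rows copies times.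

-- ===== PORT A =====
-- literal port: zero matrix, then nested loops assigning new_matrix[i][j] = adj_matrix[i%n][j%n]
def duplicate_nodes (adj_matrix : List (List Int)) (copies : Int) : List (List Int) :=
  let n : Int := adj_matrix.length
  let new_n : Int := n * copies
  let new_matrix : List (List Int) :=
    (PySem.List.pyRange 0 new_n 1).map (fun _ => (PySem.List.pyRange 0 new_n 1).map (fun _ => (0 : Int)))
  (PySem.List.pyRange 0 new_n 1).foldl (fun m i =>
    (PySem.List.pyRange 0 new_n 1).foldl (fun m j =>
      PySem.List.pySetD m i
        (PySem.List.pySetD (PySem.List.pyGetD m i [])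
          j
          (PySem.List.pyGetD (PySem.List.pyGetD adj_matrix (PySem.Int.mod i n) [])
            (PySem.Int.mod j n) 0))) m) new_matrix

-- ===== PORT B =====
-- port of Source B: base rows row[:n]*copies (list*k is [] for k ≤ 0 — exact), then the base block
-- emitted once per iteration of range(copies), each row copied (copying is identity on values).
def duplicate_nodes_alt (adj_matrix : List (List Int)) (copies : Int) : List (List Int) :=
  let n : Int := adj_matrix.length
  let base : List (List Int) :=
    adj_matrix.map (fun row => (List.replicate copies.toNat (PySem.List.slice row none (some n))).flatten)
  (PySem.List.pyRange 0 copies 1).flatMap (fun _ => base)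

-- ===== PRECONDITION & SPEC =====
-- A raises IndexError iff copies > 0, the matrix is nonempty and some row is shorter than
-- the number of rows; exactly those inputs are excluded (A returns everywhere else).
def Pre_duplicate_nodes (adj_matrix : List (List Int)) (copies : Int) : Prop :=
  copies ≤ 0 ∨ ∀ row ∈ adj_matrix, adj_matrix.length ≤ row.length
instance (adj_matrix : List (List Int)) (copies : Int) : Decidable (Pre_duplicate_nodes adj_matrix copies) := by unfold Pre_duplicate_nodes; infer_instance

def pvWitness_duplicate_nodes : List (List Int) × Int := ([[0, 1], [1, 0]], 2)

def Spec_duplicate_nodes (adj_matrix : List (List Int)) (copies : Int) (out : List (List Int)) : Prop := out = duplicate_nodes_alt adj_matrix copies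
instance (adj_matrix : List (List Int)) (copies : Int) (out : List (List Int)) : Decidable (Spec_duplicate_nodes adj_matrix copies out) := by unfold Spec_duplicate_nodes; infer_instance

-- ===== CLAIM (what is proved, stated in full; the proofs are below) =====
def Claim_equal_duplicate_nodes : Prop := ∀ (adj_matrix : List (List Int)) (copies : Int), Dom_duplicate_nodes adj_matrix copies → Pre_duplicate_nodes adj_matrix copies → Spec_duplicate_nodes adj_matrix copies (duplicate_nodes adj_matrix copies)

-- ===== LEMMAS AND PROOFS =====

-- inner loop: setting every index 0..M-1 of a list to g j overwrites the prefix
theorem pv_fold_set_const {α : Type} (g : Int → α) :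
    ∀ (M : Nat) (xs : List α), M ≤ xs.length →
    (PySem.List.pyRange 0 (M : Int) 1).foldl (fun r j => PySem.List.pySetD r j (g j)) xs
      = (PySem.List.pyRange 0 (M : Int) 1).map g ++ xs.drop M := by
  intro M
  induction M with
  | zero => intro xs _; simp [PySem.List.pyRange_one_eq_nil]
  | succ M ih =>
    intro xs hM
    have hsplit : PySem.List.pyRange 0 ((M + 1 : Nat) : Int) 1
        = PySem.List.pyRange 0 (M : Int) 1 ++ [(M : Int)] := by
      have := PySem.List.pyRange_one_succ_right (a := 0) (b := (M : Int)) (by positivity)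
      push_cast
      push_cast at this
      exact this
    have hlenpr : ((PySem.List.pyRange 0 (M : Int) 1).map g).length = M := by
      simp [PySem.List.length_pyRange_one]
    have hMlen : M < xs.length := by omega
    rw [hsplit, List.foldl_append, ih xs (by omega)]
    simp only [List.foldl_cons, List.foldl_nil, PySem.List.pySetD_natCast, List.map_append,
      List.map_cons, List.map_nil]
    rw [List.set_append]
    rw [hlenpr, if_neg (lt_irrefl M), Nat.sub_self]
    rw [List.drop_eq_getElem_cons hMlen, List.set_cons_zero, List.append_assoc]
    simp

-- hoisting: repeatedly writing into row k through the matrix equals editing the row and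
-- writing it back once
theorem pv_inner_hoist (g : Int → Int) (js : List Int) :
    ∀ (m : List (List Int)) (k : Nat), k < m.length →
    js.foldl (fun m j => PySem.List.pySetD m (k : Int)
        (PySem.List.pySetD (PySem.List.pyGetD m (k : Int) []) j (g j))) m
      = PySem.List.pySetD m (k : Int)
          (js.foldl (fun r j => PySem.List.pySetD r j (g j)) (PySem.List.pyGetD m (k : Int) [])) := by
  induction js with
  | nil =>
    intro m k hk
    simp only [List.foldl_nil, PySem.List.pySetD_natCast, PySem.List.pyGetD_natCast]
    rw [List.getD_eq_getElem?_getD, List.getElem?_eq_getElem hk, Option.getD_some]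
    exact (List.set_getElem_self hk).symm
  | cons j js ih =>
    intro m k hk
    simp only [List.foldl_cons]
    rw [ih _ k (by simp [PySem.List.pySetD_natCast, hk])]
    simp only [PySem.List.pySetD_natCast, PySem.List.pyGetD_natCast]
    rw [List.set_set]
    congr 1
    simp [List.getD_eq_getElem?_getD, hk]

-- the whole double loop: overwriting every entry of a K-wide matrix row by row
theorem pv_matrix_fill (K : Nat) (g : Int → Int → Int) :
    ∀ (M : Nat) (xs : List (List Int)), M ≤ xs.length → (∀ r ∈ xs, r.length = K) →
    (PySem.List.pyRange 0 (M : Int) 1).foldl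
        (fun m i => (PySem.List.pyRange 0 (K : Int) 1).foldl
          (fun m j => PySem.List.pySetD m i
            (PySem.List.pySetD (PySem.List.pyGetD m i []) j (g i j))) m) xs
      = (PySem.List.pyRange 0 (M : Int) 1).map
          (fun i => (PySem.List.pyRange 0 (K : Int) 1).map (g i)) ++ xs.drop M := by
  intro M
  induction M with
  | zero => intro xs _ _; simp [PySem.List.pyRange_one_eq_nil]
  | succ M ih =>
    intro xs hM hQ
    have hsplit : PySem.List.pyRange 0 ((M + 1 : Nat) : Int) 1
        = PySem.List.pyRange 0 (M : Int) 1 ++ [(M : Int)] := by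
      have := PySem.List.pyRange_one_succ_right (a := 0) (b := (M : Int)) (by positivity)
      push_cast
      push_cast at this
      exact this
    have hlenpr : ((PySem.List.pyRange 0 (M : Int) 1).map
        (fun i => (PySem.List.pyRange 0 (K : Int) 1).map (g i))).length = M := by
      simp [PySem.List.length_pyRange_one]
    have hMlen : M < xs.length := by omega
    rw [hsplit, List.foldl_append, ih xs (by omega) hQ]
    simp only [List.foldl_cons, List.foldl_nil, List.map_append, List.map_cons, List.map_nil]
    rw [pv_inner_hoist (g (M : Int)) _ _ M (by
      simp only [List.length_append, List.length_map, PySem.List.length_pyRange_one,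
        List.length_drop]
      omega)]
    have hget : PySem.List.pyGetD ((PySem.List.pyRange 0 (M : Int) 1).map
          (fun i => (PySem.List.pyRange 0 (K : Int) 1).map (g i)) ++ xs.drop M) (M : Int) []
        = xs[M] := by
      rw [PySem.List.pyGetD_natCast]
      rw [List.getD_eq_getElem?_getD, List.getElem?_append_right (by rw [hlenpr])]
      rw [hlenpr, Nat.sub_self]
      simp [hMlen]
    rw [hget]
    rw [pv_fold_set_const (g (M : Int)) K xs[M]
        (le_of_eq (hQ _ (List.getElem_mem hMlen)).symm),
      List.drop_of_length_le (le_of_eq (hQ _ (List.getElem_mem hMlen))), List.append_nil]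
    simp only [PySem.List.pySetD_natCast]
    rw [List.set_append]
    rw [hlenpr, if_neg (lt_irrefl M), Nat.sub_self]
    rw [List.drop_eq_getElem_cons hMlen, List.set_cons_zero, List.append_assoc]
    simp

-- list repeated C times, as a map with index mod length
theorem pv_flatten_replicate {α : Type} (d : α) (l : List α) (hl : l ≠ []) :
    ∀ (C : Nat),
    (List.replicate C l).flatten
      = (List.range (C * l.length)).map (fun j => l.getD (j % l.length) d) := by
  have hn : 0 < l.length := List.length_pos_iff.mpr hl
  intro C
  induction C with
  | zero => simp
  | succ C ih =>
    rw [List.replicate_succ, List.flatten_cons, ih]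
    have h1 : (C + 1) * l.length = l.length + C * l.length := by ring
    rw [h1, List.range_add, List.map_append, List.map_map]
    congr 1
    · apply List.ext_getElem
      · simp
      · intro k hk1 hk2
        simp only [List.getElem_map, List.getElem_range]
        rw [Nat.mod_eq_of_lt (by simpa using hk2)]
        simp [List.getD_eq_getElem?_getD, List.getElem?_eq_getElem (by simpa using hk2)]
    · apply List.map_congr_left
      intro j _
      simp [Nat.add_mod_left]

theorem pv_flatMap_const {α β : Type} (ys : List β) :
    ∀ (l : List α), l.flatMap (fun _ => ys) = (List.replicate l.length ys).flatten := by
  intro l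
  induction l with
  | nil => simp
  | cons x xs ih => simp [List.flatMap_cons, ih, List.replicate_succ]

-- ===== VERDICT (by name: the statement is the Claim_ definition above) =====
theorem duplicate_nodes_spec : Claim_equal_duplicate_nodes := by
  intro adj copies _ hpre
  unfold Spec_duplicate_nodes
  by_cases hc : copies ≤ 0
  · -- n*copies ≤ 0: both sides are the empty matrix
    have h0 : (adj.length : Int) * copies ≤ 0 :=
      mul_nonpos_of_nonneg_of_nonpos (Int.natCast_nonneg _) hc
    simp only [duplicate_nodes, duplicate_nodes_alt,
      PySem.List.pyRange_one_eq_nil h0, PySem.List.pyRange_one_eq_nil hc]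
    simp
  · rw [not_le] at hc
    have hrows : ∀ row ∈ adj, adj.length ≤ row.length := by
      rcases hpre with h | h
      · omega
      · exact h
    by_cases hN0 : adj = []
    · subst hN0
      simp [duplicate_nodes, duplicate_nodes_alt, PySem.List.pyRange_one_eq_nil]
    · -- main case: adj ≠ [], copies > 0
      have hNpos : 0 < adj.length := List.length_pos_iff.mpr hN0
      set N := adj.length with hNdef
      set C := copies.toNat with hCdef
      have hC : (C : Int) = copies := Int.toNat_of_nonneg (le_of_lt hc)
      have hCpos : 0 < C := by omega
      set M := N * C with hMdef
      have hnewn : (N : Int) * copies = (M : Int) := by rw [hMdef, ← hC]; push_cast; ring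
      -- ===== reduce A =====
      have hA : duplicate_nodes adj copies
          = (PySem.List.pyRange 0 (M : Int) 1).map (fun i =>
              (PySem.List.pyRange 0 (M : Int) 1).map (fun j =>
                PySem.List.pyGetD (PySem.List.pyGetD adj (PySem.Int.mod i (N : Int)) [])
                  (PySem.Int.mod j (N : Int)) 0)) := by
        simp only [duplicate_nodes]
        rw [show (adj.length : Int) = (N : Int) from rfl, hnewn]
        set init : List (List Int) :=
          (PySem.List.pyRange 0 (M : Int) 1).map
            (fun _ => (PySem.List.pyRange 0 (M : Int) 1).map (fun _ => (0 : Int))) with hinit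
        have hinitlen : init.length = M := by simp [hinit, PySem.List.length_pyRange_one]
        have hinitrows : ∀ x ∈ init, x.length = M := by
          intro x hx
          rw [hinit] at hx
          obtain ⟨_, _, rfl⟩ := List.mem_map.mp hx
          simp [PySem.List.length_pyRange_one]
        have hinitrows' : ∀ r ∈ init, r.length = M := hinitrows
        rw [pv_matrix_fill M
          (fun i j => PySem.List.pyGetD (PySem.List.pyGetD adj (PySem.Int.mod i (N : Int)) [])
            (PySem.Int.mod j (N : Int)) 0)
          M init (le_of_eq hinitlen.symm) hinitrows']
        rw [List.drop_of_length_le (le_of_eq hinitlen), List.append_nil]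
      -- ===== reduce B =====
      have hbase : ∀ row : List Int, PySem.List.slice row none (some (N : Int)) = row.take N := by
        intro row; exact PySem.List.slice_to_natCast row N
      have hB : duplicate_nodes_alt adj copies
          = (List.range (C * N)).map (fun i =>
              (List.range (C * N)).map (fun j => ((adj.getD (i % N) []).take N).getD (j % N) 0)) := by
        simp only [duplicate_nodes_alt]
        rw [pv_flatMap_const]
        have hlen : (PySem.List.pyRange 0 copies 1).length = C := by
          simp [PySem.List.length_pyRange_one]
          rfl
        rw [hlen]
        set base : List (List Int) :=
          adj.map (fun row => (List.replicate C (PySem.List.slice row none (some (adj.length : Int)))).flatten) with hbdef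
        have hbaselen : base.length = N := by simp [hbdef]; rfl
        have hbasene : base ≠ [] := by
          simp [hbdef]; exact hN0
        rw [pv_flatten_replicate ([] : List Int) base hbasene C, hbaselen]
        apply List.map_congr_left
        intro i hi
        have hiN : i % N < N := Nat.mod_lt _ hNpos
        have hget : base.getD (i % N) [] = (List.replicate C ((adj.getD (i % N) []).take N)).flatten := by
          rw [hbdef, List.getD_eq_getElem?_getD, List.getElem?_map,
            List.getElem?_eq_getElem hiN]
          simp only [Option.map_some, Option.getD_some]
          rw [hbase, List.getD_eq_getElem?_getD, List.getElem?_eq_getElem hiN]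
          rfl
        rw [hget]
        have hrowlen : ((adj.getD (i % N) []).take N).length = N := by
          rw [List.length_take]
          have := hrows (adj.getD (i % N) []) (by
            rw [List.getD_eq_getElem?_getD, List.getElem?_eq_getElem hiN]
            exact List.getElem_mem hiN)
          omega
        have hrowne : ((adj.getD (i % N) []).take N) ≠ [] := by
          intro h; rw [h] at hrowlen; simp at hrowlen; omega
        rw [pv_flatten_replicate (0 : Int) _ hrowne C, hrowlen]
      -- ===== compare =====
      rw [hA, hB]
      rw [PySem.List.pyRange_one]
      simp only [Int.sub_zero, Int.toNat_natCast, List.map_map, Function.comp_def, Int.zero_add]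
      rw [show C * N = M from Nat.mul_comm C N]
      apply List.map_congr_left
      intro i hi
      apply List.map_congr_left
      intro j hj
      simp only [PySem.Int.mod_natCast, PySem.List.pyGetD_natCast]
      have hjN : j % N < N := Nat.mod_lt _ hNpos
      have htake : (List.take N (adj.getD (i % N) [])).getD (j % N) 0
          = (adj.getD (i % N) []).getD (j % N) 0 := by
        simp [List.getD_eq_getElem?_getD, List.getElem?_take_of_lt hjN]
      rw [htake]
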